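-- pv_equiv track=rewrite | github.com/CA2528357431/leetcode-note | LIST2/0864.py | mergeSimilarItems
-- ===== SOURCE A (Python) =====
-- from typing import List
--
-- def mergeSimilarItems(items1: List[List[int]], items2: List[List[int]]) -> List[List[int]]:
--     dic = {}
--     for v, w in items1:
--         if v not in dic:
--             dic[v] = 0
--         dic[v] += w
--     for v, w in items2:
--         if v not in dic:
--             dic[v] = 0
--         dic[v] += w
--
--     res = []
--     for k in dic:
--         res.append([k, dic[k]])
--     res.sort(key=lambda x: x[0])
--     return res
-- ===== SOURCE B (Python) =====
-- def mergeSimilarItems(items1, items2):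
--     # sort the concatenation by value, then one grouping pass over the sorted
--     # entries; no dictionary is maintained.
--     merged = sorted(items1 + items2, key=lambda x: x[0])
--     res = []
--     cur_v = None
--     cur_w = 0
--     for v, w in merged:
--         if cur_v is None:
--             cur_v, cur_w = v, w
--         elif v == cur_v:
--             cur_w += w
--         else:
--             res.append([cur_v, cur_w])
--             cur_v, cur_w = v, w
--     if cur_v is not None:
--         res.append([cur_v, cur_w])
--     return res
-- ===== Notes on version B (the rewrite author's own statement) =====
-- stated objective: alternative
-- what changed: B maintains no dictionary: it sorts the concatenated item list by value once and then makes a single grouping scan over the sorted entries, accumulating weights while the value is unchanged and emitting [value, total] at each group boundary, so the output order comes from the initial sort rather than a final key sort of dict entries.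
import Mathlib
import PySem

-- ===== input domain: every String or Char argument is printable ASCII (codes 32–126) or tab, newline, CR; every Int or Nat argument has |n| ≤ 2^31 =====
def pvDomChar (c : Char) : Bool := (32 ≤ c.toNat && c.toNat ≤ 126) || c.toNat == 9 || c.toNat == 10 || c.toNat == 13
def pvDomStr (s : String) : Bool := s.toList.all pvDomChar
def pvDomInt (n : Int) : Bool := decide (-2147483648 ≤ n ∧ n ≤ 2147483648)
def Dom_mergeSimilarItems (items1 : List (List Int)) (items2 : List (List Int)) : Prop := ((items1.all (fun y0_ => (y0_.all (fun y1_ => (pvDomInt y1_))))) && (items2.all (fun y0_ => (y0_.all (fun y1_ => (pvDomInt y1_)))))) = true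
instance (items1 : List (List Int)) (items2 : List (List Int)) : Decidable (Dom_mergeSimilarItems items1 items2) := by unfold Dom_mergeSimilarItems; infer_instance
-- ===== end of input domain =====

-- B replaces A's dictionary with one sort of the concatenated item list followed by a single
-- grouping scan over the sorted entries (alternative algorithm, same asymptotic cost).

-- ===== PORT A =====
-- body of 'for v, w in items: if v not in dic: dic[v] = 0; dic[v] += w'
def pvStepA (d : PySem.Dict Int Int) (it : List Int) : PySem.Dict Int Int :=
  match it with
  | [v, w] => d.modify v 0 (· + w)
  | _ => d

def mergeSimilarItems (items1 : List (List Int)) (items2 : List (List Int)) : List (List Int) :=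
  let dic := items1.foldl pvStepA PySem.Dict.empty
  let dic := items2.foldl pvStepA dic
  let res := dic.keys.foldl (fun acc k => acc ++ [[k, dic.getD k 0]]) []
  PySem.List.sorted res (fun x => PySem.List.pyGetD x 0 0) false

-- ===== PORT B =====
-- body of the grouping loop: state = (res, current (value, weight) group or None)
def pvStepB (s : List (List Int) × Option (Int × Int)) (it : List Int) :
    List (List Int) × Option (Int × Int) :=
  match it with
  | [v, w] =>
    match s.2 with
    | none => (s.1, some (v, w))
    | some (cv, cw) =>
      if v == cv then (s.1, some (cv, cw + w)) else (s.1 ++ [[cv, cw]], some (v, w))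
  | _ => s

-- the trailing 'if cur_v is not None: res.append([cur_v, cur_w])'
def pvFinB (s : List (List Int) × Option (Int × Int)) : List (List Int) :=
  match s.2 with
  | none => s.1
  | some (cv, cw) => s.1 ++ [[cv, cw]]

def mergeSimilarItems_alt (items1 : List (List Int)) (items2 : List (List Int)) : List (List Int) :=
  let merged := PySem.List.sorted (items1 ++ items2) (fun x => PySem.List.pyGetD x 0 0) false
  pvFinB (merged.foldl pvStepB (([] : List (List Int)), (none : Option (Int × Int))))

-- ===== PRECONDITION & SPEC =====
-- Pre_ excludes exactly the inputs on which A raises: an item that is not a two-element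
-- pair makes 'for v, w in …' raise ValueError (B unpacks the same way and raises there too).
def Pre_mergeSimilarItems (items1 : List (List Int)) (items2 : List (List Int)) : Prop :=
  (∀ it ∈ items1, it.length = 2) ∧ (∀ it ∈ items2, it.length = 2)
instance (items1 : List (List Int)) (items2 : List (List Int)) : Decidable (Pre_mergeSimilarItems items1 items2) := by unfold Pre_mergeSimilarItems; infer_instance

def pvWitness_mergeSimilarItems : List (List Int) × List (List Int) :=
  ([[1, 2], [3, 4], [1, 5]], [[3, 1], [2, 7]])

def Spec_mergeSimilarItems (items1 : List (List Int)) (items2 : List (List Int)) (out : List (List Int)) : Prop := out = mergeSimilarItems_alt items1 items2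
instance (items1 : List (List Int)) (items2 : List (List Int)) (out : List (List Int)) : Decidable (Spec_mergeSimilarItems items1 items2 out) := by unfold Spec_mergeSimilarItems; infer_instance

-- ===== CLAIM (what is proved, stated in full; the proofs are below) =====
def Claim_equal_mergeSimilarItems : Prop := ∀ (items1 : List (List Int)) (items2 : List (List Int)), Dom_mergeSimilarItems items1 items2 → Pre_mergeSimilarItems items1 items2 → Spec_mergeSimilarItems items1 items2 (mergeSimilarItems items1 items2)

-- ===== LEMMAS AND PROOFS =====
def pvKey (it : List Int) : Int := PySem.List.pyGetD it 0 0
def pvWt (it : List Int) : Int := PySem.List.pyGetD it 1 0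
def pvWsum (L : List (List Int)) (k : Int) : Int :=
  ((L.filter (fun it => pvKey it == k)).map pvWt).sum
lemma pvKey_pair (v w : Int) : pvKey [v, w] = v := by
  simp [pvKey, PySem.List.pyGetD_zero_cons]
lemma pvWt_pair (v w : Int) : pvWt [v, w] = w := by
  simp [pvWt, PySem.List.pyGetD]
lemma getD_fold_stepA (L : List (List Int)) (d : PySem.Dict Int Int)
    (h2 : ∀ it ∈ L, it.length = 2) (k : Int) :
    (L.foldl pvStepA d).getD k 0 = d.getD k 0 + pvWsum L k := by
  induction L generalizing d with
  | nil => simp [pvWsum]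
  | cons it L ih =>
    obtain ⟨v, w, rfl⟩ : ∃ v w, it = [v, w] := by
      have := h2 it (by simp)
      match it, this with
      | [v, w], _ => exact ⟨v, w, rfl⟩
    rw [List.foldl_cons, ih _ (fun x hx => h2 x (by simp [hx]))]
    show (d.modify v 0 (· + w)).getD k 0 + _ = _
    rw [PySem.Dict.getD_modify]
    simp only [pvWsum, List.filter_cons, pvKey_pair]
    by_cases hk : k = v
    · simp [hk, pvWt_pair]; ring
    · simp [hk, Ne.symm hk]

lemma stepA_congr (L : List (List Int)) (h2 : ∀ it ∈ L, it.length = 2) :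
    ∀ (d : PySem.Dict Int Int) (it : List Int), it ∈ L →
      pvStepA d it = d.modify (pvKey it) 0 (· + pvWt it) := by
  intro d it hit
  match it, h2 it hit with
  | [v, w], _ => simp [pvStepA, pvKey_pair, pvWt_pair]

lemma keys_fold_stepA (L : List (List Int)) (h2 : ∀ it ∈ L, it.length = 2) :
    (L.foldl pvStepA PySem.Dict.empty).keys = PySem.Set.ofList (L.map pvKey) := by
  rw [PySem.List.foldl_congr_mem _ _ _ _ (stepA_congr L h2)]
  rw [PySem.Dict.keys_foldl_modify_key (f := fun _ it => (· + pvWt it))]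
  simp [PySem.Dict.keys_empty, PySem.Set.update_nil_left]

def pvGspec (L : List (List Int)) : List (List Int) :=
  (PySem.Set.ofList (L.map pvKey)).map (fun k => [k, pvWsum L k])

lemma A_char (items1 items2 : List (List Int))
    (h1 : ∀ it ∈ items1, it.length = 2) (h2 : ∀ it ∈ items2, it.length = 2) :
    mergeSimilarItems items1 items2 =
      (PySem.List.sorted (PySem.Set.ofList ((items1 ++ items2).map pvKey)) (fun x => x) false).map
        (fun k => [k, pvWsum (items1 ++ items2) k]) := by
  have hL : ∀ it ∈ items1 ++ items2, it.length = 2 := by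
    intro it hit; rcases List.mem_append.1 hit with h | h
    · exact h1 it h
    · exact h2 it h
  unfold mergeSimilarItems
  simp only [← List.foldl_append]
  set L := items1 ++ items2 with hLdef
  set d := L.foldl pvStepA PySem.Dict.empty with hd
  rw [PySem.List.foldl_append_singleton_eq_map (f := fun k => [k, d.getD k 0])]
  have hfun : (fun k => [k, d.getD k 0]) = (fun k => [k, pvWsum L k]) := by
    funext k
    rw [hd, getD_fold_stepA L _ hL, PySem.Dict.getD_empty, zero_add]
  have hkeys : d.keys = PySem.Set.ofList (L.map pvKey) := keys_fold_stepA L hL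
  rw [hfun, hkeys, List.nil_append]
  apply PySem.List.sorted_eq_of_perm_of_pairwise_lt
  · exact List.Perm.map _ (PySem.List.sorted_perm (PySem.Set.ofList (L.map pvKey)) (fun x => x) false)
  · have hp := PySem.List.sorted_ofList_pairwise_lt (L.map pvKey)
    refine List.Pairwise.map (fun k => [k, pvWsum L k]) (fun a b hab => ?_) hp
    show PySem.List.pyGetD [a, pvWsum L a] 0 0 < PySem.List.pyGetD [b, pvWsum L b] 0 0
    simpa [PySem.List.pyGetD_zero_cons] using hab
lemma gspec_merge (cv cw w : Int) (ms : List (List Int)) :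
    pvGspec ([cv, cw] :: [cv, w] :: ms) = pvGspec ([cv, cw + w] :: ms) := by
  unfold pvGspec
  have hset : PySem.Set.ofList (([cv, cw] :: [cv, w] :: ms).map pvKey)
      = PySem.Set.ofList (([cv, cw + w] :: ms).map pvKey) := by
    simp only [List.map_cons, pvKey_pair, PySem.Set.ofList_eq_foldl, List.foldl_cons]
    congr 1
    simp
  rw [hset]
  refine List.map_congr_left (fun k hk => ?_)
  simp only [pvWsum, List.filter_cons, pvKey_pair]
  by_cases h : cv = k
  · simp [h, pvWt_pair]; ring
  · simp [h]

lemma gspec_new (cv cw : Int) (ms : List (List Int)) (h : ∀ it ∈ ms, pvKey it ≠ cv) :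
    pvGspec ([cv, cw] :: ms) = [cv, cw] :: pvGspec ms := by
  unfold pvGspec
  have hnotmem : cv ∉ ms.map pvKey := by
    intro hmem
    obtain ⟨it, hit, hke⟩ := List.mem_map.1 hmem
    exact h it hit hke
  have hset : PySem.Set.ofList (([cv, cw] :: ms).map pvKey)
      = cv :: PySem.Set.ofList (ms.map pvKey) := by
    rw [List.map_cons, pvKey_pair, PySem.Set.ofList_cons]
    congr 1
    simp only [PySem.Set.discard]
    refine List.filter_eq_self.2 (fun y hy => ?_)
    have : y ∈ ms.map pvKey := (PySem.Set.mem_ofList _ _).1 hy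
    simp only [ne_eq, Bool.not_eq_eq_eq_not, Bool.not_true, beq_eq_false_iff_ne]
    intro he; exact hnotmem (he ▸ this)
  rw [hset, List.map_cons]
  congr 1
  · -- head entry
    simp only [pvWsum, List.filter_cons, pvKey_pair]
    have : ms.filter (fun it => pvKey it == cv) = [] := by
      refine List.filter_eq_nil_iff.2 (fun it hit => ?_)
      simp [h it hit]
    simp [this, pvWt_pair]
  · refine List.map_congr_left (fun k hk => ?_)
    have hkne : cv ≠ k := by
      have : k ∈ ms.map pvKey := by
        have := PySem.Set.mem_ofList (xs := ms.map pvKey) (y := k)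
        exact this.1 hk
      intro he; exact hnotmem (he ▸ this)
    simp [pvWsum, pvKey_pair, hkne]

lemma scanB (ms : List (List Int)) : ∀ (res : List (List Int)) (cv cw : Int),
    (∀ it ∈ ms, it.length = 2) → ms.Pairwise (fun a b => pvKey a ≤ pvKey b) →
    (∀ it ∈ ms, cv ≤ pvKey it) →
    pvFinB (ms.foldl pvStepB (res, some (cv, cw))) = res ++ pvGspec ([cv, cw] :: ms) := by
  induction ms with
  | nil =>
    intro res cv cw _ _ _
    simp [pvFinB, pvGspec, pvWsum, pvKey_pair, pvWt_pair, PySem.Set.ofList_eq_foldl]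
  | cons it ms ih =>
    intro res cv cw h2 hpw hle
    obtain ⟨v, w, rfl⟩ : ∃ v w, it = [v, w] := by
      have := h2 it (List.mem_cons_self ..)
      match it, this with
      | [v, w], _ => exact ⟨v, w, rfl⟩
    have h2' : ∀ x ∈ ms, x.length = 2 := fun x hx => h2 x (by simp [hx])
    have hpw' : ms.Pairwise (fun a b => pvKey a ≤ pvKey b) := (List.pairwise_cons.1 hpw).2
    have hhead : ∀ x ∈ ms, pvKey [v, w] ≤ pvKey x := (List.pairwise_cons.1 hpw).1
    rw [List.foldl_cons]
    by_cases hv : v = cv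
    · subst hv
      have hstep : pvStepB (res, some (v, cw)) [v, w] = (res, some (v, cw + w)) := by
        simp [pvStepB]
      rw [hstep, ih res v (cw + w) h2' hpw'
        (fun x hx => by simpa [pvKey_pair] using hhead x hx)]
      rw [gspec_merge]
    · have hstep : pvStepB (res, some (cv, cw)) [v, w] = (res ++ [[cv, cw]], some (v, w)) := by
        simp [pvStepB, hv]
      rw [hstep, ih (res ++ [[cv, cw]]) v w h2' hpw'
        (fun x hx => by simpa [pvKey_pair] using hhead x hx)]
      have hne : ∀ x ∈ ([v, w] :: ms), pvKey x ≠ cv := by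
        intro x hx
        rcases List.mem_cons.1 hx with rfl | hx
        · simpa [pvKey_pair] using hv
        · have hvle : v ≤ pvKey x := by simpa [pvKey_pair] using hhead x hx
          have hcvv : cv ≤ v := by simpa [pvKey_pair] using hle [v, w] (by simp)
          intro he
          exact hv (le_antisymm hcvv (he ▸ hvle)).symm
      rw [gspec_new cv cw ([v, w] :: ms) hne, List.append_assoc]
      rfl

lemma B_char (items1 items2 : List (List Int))
    (h1 : ∀ it ∈ items1, it.length = 2) (h2 : ∀ it ∈ items2, it.length = 2) :
    mergeSimilarItems_alt items1 items2 =
      pvGspec (PySem.List.sorted (items1 ++ items2) (fun x => PySem.List.pyGetD x 0 0) false) := by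
  unfold mergeSimilarItems_alt
  set merged := PySem.List.sorted (items1 ++ items2) (fun x => PySem.List.pyGetD x 0 0) false
    with hm
  have h2m : ∀ it ∈ merged, it.length = 2 := by
    intro it hit
    have : it ∈ items1 ++ items2 := (PySem.List.mem_sorted _ _ _ _).1 hit
    rcases List.mem_append.1 this with h | h
    · exact h1 it h
    · exact h2 it h
  have hpwm : merged.Pairwise (fun a b => pvKey a ≤ pvKey b) := by
    have := PySem.List.sorted_pairwise (items1 ++ items2) (fun x => PySem.List.pyGetD x 0 0)
    exact this
  match merged, h2m, hpwm with
  | [], _, _ =>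
    show pvFinB (List.foldl pvStepB ([], none) []) = _
    simp [pvFinB, pvGspec, pvWsum]
  | it :: ms, h2m, hpwm =>
    obtain ⟨v, w, rfl⟩ : ∃ v w, it = [v, w] := by
      have := h2m it (List.mem_cons_self ..)
      match it, this with
      | [v, w], _ => exact ⟨v, w, rfl⟩
    have hstep : pvStepB (([] : List (List Int)), (none : Option (Int × Int))) [v, w]
        = ([], some (v, w)) := by simp [pvStepB]
    show pvFinB (List.foldl pvStepB ([], none) ([v, w] :: ms)) = _
    rw [List.foldl_cons, hstep,
      scanB ms [] v w (fun x hx => h2m x (by simp [hx])) (List.pairwise_cons.1 hpwm).2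
        (fun x hx => by simpa [pvKey_pair] using (List.pairwise_cons.1 hpwm).1 x hx)]
    simp

lemma ofList_sublist {α : Type} [BEq α] [LawfulBEq α] (xs : List α) :
    (PySem.Set.ofList xs).Sublist xs := by
  suffices h : ∀ (xs : List α) (s : List α), ∃ t, xs.foldl PySem.Set.add s = s ++ t ∧ t.Sublist xs by
    obtain ⟨t, ht, hs⟩ := h xs []
    rw [PySem.Set.ofList_eq_foldl, ht]
    simpa using hs
  intro xs
  induction xs with
  | nil => exact fun s => ⟨[], by simp⟩
  | cons y xs ih =>
    intro s
    rw [List.foldl_cons, PySem.Set.add_eq_ite]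
    by_cases hy : y ∈ s
    · obtain ⟨t, ht, hs⟩ := ih s
      exact ⟨t, by simp [hy, ht], hs.cons y⟩
    · obtain ⟨t, ht, hs⟩ := ih (s ++ [y])
      exact ⟨y :: t, by simp [hy, ht], hs.cons₂ y⟩

lemma ofList_pairwise_lt (xs : List Int) (h : xs.Pairwise (· ≤ ·)) :
    (PySem.Set.ofList xs).Pairwise (· < ·) := by
  have hsub := ofList_sublist xs
  have hle : (PySem.Set.ofList xs).Pairwise (· ≤ ·) := h.sublist hsub
  have hnd : (PySem.Set.ofList xs).Nodup := PySem.Set.nodup_ofList xs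
  exact (hle.and hnd).imp (fun {a b} hab => lt_of_le_of_ne hab.1 hab.2)

lemma a_eq_b_of_pairs (items1 items2 : List (List Int))
    (h1 : ∀ it ∈ items1, it.length = 2) (h2 : ∀ it ∈ items2, it.length = 2) :
    mergeSimilarItems items1 items2 = mergeSimilarItems_alt items1 items2 := by
  rw [A_char items1 items2 h1 h2, B_char items1 items2 h1 h2]
  set L := items1 ++ items2 with hL
  set merged := PySem.List.sorted L (fun x => PySem.List.pyGetD x 0 0) false with hm
  have hpermM : merged.Perm L := PySem.List.sorted_perm L _ false
  have hKm_pw : (merged.map pvKey).Pairwise (· ≤ ·) := by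
    have := PySem.List.sorted_map_key_pairwise L (fun x => PySem.List.pyGetD x 0 0)
    exact this
  have hperm : (PySem.Set.ofList (merged.map pvKey)).Perm (PySem.Set.ofList (L.map pvKey)) := by
    refine (List.perm_ext_iff_of_nodup (PySem.Set.nodup_ofList _) (PySem.Set.nodup_ofList _)).2
      (fun x => ?_)
    rw [PySem.Set.mem_ofList, PySem.Set.mem_ofList]
    exact (hpermM.map pvKey).mem_iff
  have hset : PySem.List.sorted (PySem.Set.ofList (L.map pvKey)) (fun x => x) false
      = PySem.Set.ofList (merged.map pvKey) :=
    PySem.List.sorted_eq_of_perm_of_pairwise_lt _ _ _ hperm (ofList_pairwise_lt _ hKm_pw)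
  rw [hset]
  unfold pvGspec
  refine List.map_congr_left (fun k hk => ?_)
  have : pvWsum L k = pvWsum merged k := by
    unfold pvWsum
    exact (((hpermM.filter _).map pvWt).sum_eq).symm
  rw [this]

-- ===== VERDICT (by name: the statement is the Claim_ definition above) =====
theorem mergeSimilarItems_spec : Claim_equal_mergeSimilarItems := by
  intro items1 items2 _ hpre
  exact a_eq_b_of_pairs items1 items2 hpre.1 hpre.2
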